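-- pv_equiv track=rewrite | github.com/jordanhubbard/Theseus | cleanroom/python/theseus_urllib_parse_cr/__init__.py | _split_scheme
-- ===== SOURCE A (Python) =====
-- _SCHEME_CHARS = set(
--     "abcdefghijklmnopqrstuvwxyz"
--     "ABCDEFGHIJKLMNOPQRSTUVWXYZ"
--     "0123456789"
--     "+-."
-- )
--
-- def _split_scheme(url):
--     """Return (scheme_lower, rest). Empty scheme on failure."""
--     if not url:
--         return "", url
--     c = url[0]
--     if not (("a" <= c <= "z") or ("A" <= c <= "Z")):
--         return "", url
--     n = len(url)
--     i = 1
--     while i < n: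
--         c = url[i]
--         if c == ":":
--             return url[:i].lower(), url[i + 1:]
--         if c not in _SCHEME_CHARS:
--             return "", url
--         i += 1
--     return "", url
-- ===== SOURCE B (Python) =====
-- _SCHEME_CHARS = set(
--     "abcdefghijklmnopqrstuvwxyz"
--     "ABCDEFGHIJKLMNOPQRSTUVWXYZ"
--     "0123456789"
--     "+-."
-- )
--
-- def _split_scheme(url):
--     """Return (scheme_lower, rest). Empty scheme on failure."""
--     idx = url.find(":")
--     if idx <= 0:
--         return "", url
--     scheme = url[:idx]
--     if scheme[0].isalpha() and all(c in _SCHEME_CHARS for c in scheme):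
--         return scheme.lower(), url[idx + 1:]
--     return "", url
-- ===== Notes on version B (the rewrite author's own statement) =====
-- stated objective: idiomatic
-- what changed: B replaces A's manual character-by-character index scan with the idiomatic find-then-validate decomposition: locate the first colon with str.find, then validate the whole candidate prefix (first char a letter, all chars in the scheme set) before splitting; str.find and all() run at C speed instead of a per-character Python loop.
import Mathlib
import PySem

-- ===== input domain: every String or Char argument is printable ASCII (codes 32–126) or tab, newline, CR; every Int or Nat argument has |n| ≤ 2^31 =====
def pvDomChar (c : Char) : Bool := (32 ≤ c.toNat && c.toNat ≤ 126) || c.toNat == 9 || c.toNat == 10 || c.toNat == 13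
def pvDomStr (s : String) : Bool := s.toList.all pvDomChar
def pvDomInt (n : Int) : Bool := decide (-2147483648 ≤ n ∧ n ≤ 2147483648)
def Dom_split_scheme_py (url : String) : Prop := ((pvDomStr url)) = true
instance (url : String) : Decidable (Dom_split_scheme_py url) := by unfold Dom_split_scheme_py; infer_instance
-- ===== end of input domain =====

-- B replaces A's manual index scan with the idiomatic find-the-colon-then-validate-the-prefix decomposition (same asymptotic cost; str.find does the scan).

-- shared constant: the characters of _SCHEME_CHARS
def pvSchemeChars : List Char :=
  "abcdefghijklmnopqrstuvwxyzABCDEFGHIJKLMNOPQRSTUVWXYZ0123456789+-.".toList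

-- ===== PORT A =====
-- the 'while i < n' loop of A: rest = url[i:]; branches in A's order
def pvALoop (url : String) (i : Nat) (rest : List Char) : String × String :=
  match rest with
  | [] => ("", url)
  | c :: rs =>
    if c = ':' then
      (String.ofList (PySem.Chars.lower (PySem.Chars.slice url.toList none (some (i : Int)))),
       String.ofList (PySem.Chars.slice url.toList (some ((i : Int) + 1)) none))
    else if pvSchemeChars.contains c then pvALoop url (i + 1) rs
    else ("", url)

def split_scheme_py (url : String) : String × String :=
  match url.toList with
  | [] => ("", url)                                     -- 'if not url'
  | c :: rest =>
    if ('a' ≤ c ∧ c ≤ 'z') ∨ ('A' ≤ c ∧ c ≤ 'Z') then pvALoop url 1 rest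
    else ("", url)

-- ===== PORT B =====
def split_scheme_py_alt (url : String) : String × String :=
  let idx := PySem.Str.find url ":"
  if idx ≤ 0 then ("", url)
  else
    let scheme := PySem.Chars.slice url.toList none (some idx)   -- url[:idx]
    match PySem.List.pyGet? scheme 0 with                        -- scheme[0]; idx > 0, so never none
    | none => ("", url)
    | some c =>
      if (('a' ≤ c ∧ c ≤ 'z') ∨ ('A' ≤ c ∧ c ≤ 'Z')) ∧
          scheme.all (fun d => pvSchemeChars.contains d) then
        (String.ofList (PySem.Chars.lower scheme),
         String.ofList (PySem.Chars.slice url.toList (some (idx + 1)) none))  -- url[idx+1:]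
      else ("", url)

-- ===== PRECONDITION & SPEC =====
def Spec_split_scheme_py (url : String) (out : String × String) : Prop := out = split_scheme_py_alt url
instance (url : String) (out : String × String) : Decidable (Spec_split_scheme_py url out) := by unfold Spec_split_scheme_py; infer_instance

-- ===== CLAIM (what is proved, stated in full; the proofs are below) =====
def Claim_equal_split_scheme_py : Prop := ∀ (url : String), Dom_split_scheme_py url → Spec_split_scheme_py url (split_scheme_py url)

-- ===== LEMMAS AND PROOFS =====

-- [d] <+: l ↔ l.head? = some d  (small glue fact)
theorem pvSingleton_prefix_iff {d : Char} {l : List Char} :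
    [d] <+: l ↔ l.head? = some d := by
  cases l with
  | nil => simp
  | cons x xs =>
    constructor
    · intro h
      obtain ⟨t, ht⟩ := h
      simp at ht
      simp [ht.1]
    · intro h
      simp at h
      exact ⟨xs, by simp [h]⟩

-- first index of ':' in a char list
def pvFF (rs : List Char) : Option Nat :=
  match rs with
  | [] => none
  | d :: t => if d = ':' then some 0 else (pvFF t).map (· + 1)

-- what A's loop finds: the first ':' provided everything before it is a scheme char
def pvHub (rs : List Char) : Option Nat :=
  match rs with
  | [] => none
  | d :: t => if d = ':' then some 0
              else if pvSchemeChars.contains d then (pvHub t).map (· + 1)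
              else none

theorem pvFF_none_iff (rs : List Char) : pvFF rs = none ↔ ':' ∉ rs := by
  induction rs with
  | nil => simp [pvFF]
  | cons d t ih =>
    by_cases hd : d = ':'
    · simp [pvFF, hd]
    · simp [pvFF, hd, ih]
      exact fun _ h => hd h.symm

theorem pvFF_some (rs : List Char) (k : Nat) (h : pvFF rs = some k) :
    rs[k]? = some ':' ∧ ∀ j < k, rs[j]? ≠ some ':' := by
  induction rs generalizing k with
  | nil => simp [pvFF] at h
  | cons d t ih =>
    by_cases hd : d = ':'
    · simp [pvFF, hd] at h
      subst h; simp [hd]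
    · simp [pvFF, hd] at h
      obtain ⟨k', hk', rfl⟩ := h
      obtain ⟨h1, h2⟩ := ih k' hk'
      refine ⟨by simpa using h1, ?_⟩
      intro j hj
      cases j with
      | zero => simpa using hd
      | succ j' => simpa using h2 j' (by omega)

theorem pvFind_eq (cs : List Char) :
    PySem.Chars.find cs [':'] =
      match pvFF cs with
      | none => -1
      | some k => (k : Int) := by
  cases h : pvFF cs with
  | none =>
    have hni : ¬ [':'] <:+: cs := by
      rw [List.singleton_infix_iff]
      exact (pvFF_none_iff cs).mp h
    simp [(PySem.Chars.find_eq_neg_one_iff cs [':']).mpr hni]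
  | some k =>
    obtain ⟨hk, hmin⟩ := pvFF_some cs k h
    have hmem : ':' ∈ cs := List.mem_of_getElem? hk
    have hnn : 0 ≤ PySem.Chars.find cs [':'] := by
      rw [PySem.Chars.find_nonneg_iff]
      exact (List.singleton_infix_iff ':' cs).mpr hmem
    obtain ⟨hpre, hfmin⟩ := PySem.Chars.find_spec hnn
    set f := (PySem.Chars.find cs [':']).toNat with hf
    have hfeq : cs[f]? = some ':' := by
      have := hpre
      rw [pvSingleton_prefix_iff, List.head?_drop] at this
      exact this
    have hkf : ¬ k < f := by
      intro hlt
      exact (hfmin k hlt) (by rw [pvSingleton_prefix_iff, List.head?_drop]; exact hk)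
    have hfk : ¬ f < k := fun hlt => (hmin f hlt) hfeq
    have hfkeq : f = k := by omega
    have : PySem.Chars.find cs [':'] = (k : Int) := by
      rw [← hfkeq, hf, Int.toNat_of_nonneg hnn]
    simp [this]

theorem pvHub_eq (rs : List Char) :
    pvHub rs =
      match pvFF rs with
      | none => none
      | some k => if (rs.take k).all (fun d => pvSchemeChars.contains d) then some k else none := by
  induction rs with
  | nil => rfl
  | cons d t ih =>
    by_cases hd : d = ':'
    · simp [pvHub, pvFF, hd]
    · by_cases hs : pvSchemeChars.contains d
      · have hs' : d ∈ pvSchemeChars := by simpa using hs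
        cases h : pvFF t with
        | none => simp [pvHub, pvFF, hd, hs', ih, h]
        | some k =>
          by_cases ha : (t.take k).all (fun d => pvSchemeChars.contains d)
          · have ha' : ∀ x ∈ t.take k, x ∈ pvSchemeChars := by simpa using ha
            simp [pvHub, pvFF, hd, ih, h, hs', List.take_succ_cons]
          · have ha' : ¬ ∀ x ∈ t.take k, x ∈ pvSchemeChars := by simpa using ha
            simp [pvHub, pvFF, hd, ih, h, ha', hs', List.take_succ_cons]
      · have hs' : d ∉ pvSchemeChars := by simpa using hs
        cases h : pvFF t with
        | none => simp [pvHub, pvFF, hd, hs', h]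
        | some k => simp [pvHub, pvFF, hd, hs', h, List.take_succ_cons]

theorem pvALoop_eq (rest : List Char) (url : String) (i : Nat) :
    pvALoop url i rest =
      match pvHub rest with
      | some m =>
        (String.ofList (PySem.Chars.lower (PySem.Chars.slice url.toList none (some ((i + m : Nat) : Int)))),
         String.ofList (PySem.Chars.slice url.toList (some (((i + m + 1 : Nat)) : Int)) none))
      | none => ("", url) := by
  induction rest generalizing i with
  | nil => rfl
  | cons c rs ih =>
    by_cases hc : c = ':'
    · simp only [pvALoop, pvHub, if_pos hc]
      norm_num
    · by_cases hs : pvSchemeChars.contains c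
      · have hs' : c ∈ pvSchemeChars := by simpa using hs
        have h1 : pvALoop url i (c :: rs) = pvALoop url (i + 1) rs := by
          simp [pvALoop, hc, hs']
        have h2 : pvHub (c :: rs) = (pvHub rs).map (· + 1) := by
          simp [pvHub, hc, hs']
        rw [h1, h2, ih (i + 1)]
        cases h : pvHub rs with
        | none => rfl
        | some m =>
          simp only [Option.map_some]
          have e1 : i + 1 + m = i + (m + 1) := by omega
          rw [e1]
      · have hs' : c ∉ pvSchemeChars := by simpa using hs
        have h1 : pvALoop url i (c :: rs) = ("", url) := by
          simp [pvALoop, hc, hs']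
        have h2 : pvHub (c :: rs) = none := by
          simp [pvHub, hc, hs']
        rw [h1, h2]

theorem pvAlpha_mem (c : Char) (h : ('a' ≤ c ∧ c ≤ 'z') ∨ ('A' ≤ c ∧ c ≤ 'Z')) :
    pvSchemeChars.contains c = true := by
  rw [List.contains_eq_mem, decide_eq_true_eq]
  have hb : (97 ≤ c.toNat ∧ c.toNat ≤ 122) ∨ (65 ≤ c.toNat ∧ c.toNat ≤ 90) := by
    rcases h with ⟨h1, h2⟩ | ⟨h1, h2⟩
    · exact Or.inl ⟨h1, h2⟩
    · exact Or.inr ⟨h1, h2⟩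
  have hn : c.toNat ∈ pvSchemeChars.map Char.toNat := by
    simp [pvSchemeChars]; omega
  simp only [List.mem_map] at hn
  obtain ⟨a, ha, he⟩ := hn
  have : a = c := Char.ext (UInt32.toNat_inj.mp he)
  exact this ▸ ha

-- ===== VERDICT (by name: the statement is the Claim_ definition above) =====
theorem split_scheme_py_spec : Claim_equal_split_scheme_py := by
  intro url _
  unfold Spec_split_scheme_py split_scheme_py split_scheme_py_alt
  simp only [PySem.Str.find_eq, PySem.Chars.slice_eq_listSlice]
  rw [show (":" : String).toList = [':'] from rfl]
  cases hcs : url.toList with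
  | nil =>
    have hfind : PySem.Chars.find ([] : List Char) [':'] = -1 := by
      rw [pvFind_eq]; simp [pvFF]
    simp [hfind]
  | cons c rs =>
    by_cases hc : c = ':'
    · have hffc : pvFF (c :: rs) = some 0 := by simp [pvFF, hc]
      have hfind : PySem.Chars.find (c :: rs) [':'] = 0 := by rw [pvFind_eq, hffc]; simp
      have ha : ¬ (('a' ≤ c ∧ c ≤ 'z') ∨ ('A' ≤ c ∧ c ≤ 'Z')) := by
        subst hc; decide
      simp [hfind, ha]
    · cases hff : pvFF rs with
      | none =>
        have hffc : pvFF (c :: rs) = none := by simp [pvFF, hc, hff]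
        have hfind : PySem.Chars.find (c :: rs) [':'] = -1 := by rw [pvFind_eq, hffc]
        have hhubc : pvHub rs = none := by rw [pvHub_eq, hff]
        by_cases ha : ('a' ≤ c ∧ c ≤ 'z') ∨ ('A' ≤ c ∧ c ≤ 'Z') <;>
          simp [ha, hfind, pvALoop_eq, hhubc]
      | some k =>
        have hffc : pvFF (c :: rs) = some (k + 1) := by simp [pvFF, hc, hff]
        have hfind : PySem.Chars.find (c :: rs) [':'] = ((k + 1 : Nat) : Int) := by
          rw [pvFind_eq, hffc]
        have hpos : ¬ ((k + 1 : Nat) : Int) ≤ 0 := by omega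
        have hslice : PySem.List.slice (c :: rs) none (some ((k + 1 : Nat) : Int)) =
            c :: rs.take k := by
          rw [PySem.List.slice_to _ (by omega)]
          simp [List.take_succ_cons]
        have hget : PySem.List.pyGet? (c :: rs.take k) (0 : Int) = some c := by
          simp [PySem.List.pyGet?, PySem.List.pyIdx?]
        by_cases ha : ('a' ≤ c ∧ c ≤ 'z') ∨ ('A' ≤ c ∧ c ≤ 'Z')
        · have hsc : pvSchemeChars.contains c = true := pvAlpha_mem c ha
          have hhub : pvHub rs =
              (if (rs.take k).all (fun d => pvSchemeChars.contains d) then some k else none) := by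
            rw [pvHub_eq, hff]
          by_cases hall : (rs.take k).all (fun d => pvSchemeChars.contains d)
          · rw [if_pos hall] at hhub
            have hcond : (('a' ≤ c ∧ c ≤ 'z') ∨ ('A' ≤ c ∧ c ≤ 'Z')) ∧
                ((c :: rs.take k).all (fun d => pvSchemeChars.contains d)) = true := by
              refine ⟨ha, ?_⟩
              simp only [List.all_cons, Bool.and_eq_true]
              exact ⟨hsc, hall⟩
            simp only [if_pos ha, pvALoop_eq, hhub, hcs, hfind, if_neg hpos, hslice, hget,
              if_pos hcond]
            have e : ((1 + k : Nat) : Int) = ((k + 1 : Nat) : Int) := by omega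
            rw [PySem.Chars.slice_eq_listSlice, PySem.Chars.slice_eq_listSlice, e, hslice,
              PySem.List.slice_from _ (by omega : (0:Int) ≤ ((1 + k + 1 : Nat) : Int)),
              PySem.List.slice_from _ (by omega : (0:Int) ≤ ((k + 1 : Nat) : Int) + 1)]
            have e1 : ((1 + k + 1 : Nat) : Int).toNat = k + 2 := by omega
            have e2 : (((k + 1 : Nat) : Int) + 1).toNat = k + 2 := by omega
            rw [e1, e2]
          · rw [if_neg hall] at hhub
            have hcond : ¬ ((('a' ≤ c ∧ c ≤ 'z') ∨ ('A' ≤ c ∧ c ≤ 'Z')) ∧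
                ((c :: rs.take k).all (fun d => pvSchemeChars.contains d)) = true) := by
              intro h
              apply hall
              have h2 := h.2
              simp only [List.all_cons, Bool.and_eq_true] at h2
              exact h2.2
            simp only [if_pos ha, pvALoop_eq, hhub, hfind, if_neg hpos, hslice, hget,
              if_neg hcond]
        · have hcond : ¬ ((('a' ≤ c ∧ c ≤ 'z') ∨ ('A' ≤ c ∧ c ≤ 'Z')) ∧
              ((c :: rs.take k).all (fun d => pvSchemeChars.contains d)) = true) :=
            fun h => ha h.1
          simp only [if_neg ha, hfind, if_neg hpos, hslice, hget, if_neg hcond]
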